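-- pv_equiv track=rewrite | github.com/leaf021231-boop/KPV_ZUBT | data.py | resolve_multi_check
-- ===== SOURCE A (Python) =====
-- def resolve_multi_check(check_results):
--     if not check_results:
--         return "full_failure"
--     s = sum(1 for r in check_results if r["success"])
--     if s == len(check_results):
--         return "full_success"
--     if s == 0:
--         return "full_failure"
--     return "partial_success"
-- ===== SOURCE B (Python) =====
-- def resolve_multi_check(check_results):
--     seen = {r["success"] for r in check_results}
--     return {
--         (True, False): "full_success",
--         (False, True): "full_failure",
--         (True, True): "partial_success",
--         (False, False): "full_failure",
--     }[(True in seen, False in seen)]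
-- ===== Notes on version B (the rewrite author's own statement) =====
-- stated objective: alternative
-- what changed: Reduces the results to the set of distinct success flags and dispatches through a four-entry table keyed by (True in set, False in set), replacing the count/len comparison and all branches (the empty case falls out of the table).
import Mathlib
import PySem

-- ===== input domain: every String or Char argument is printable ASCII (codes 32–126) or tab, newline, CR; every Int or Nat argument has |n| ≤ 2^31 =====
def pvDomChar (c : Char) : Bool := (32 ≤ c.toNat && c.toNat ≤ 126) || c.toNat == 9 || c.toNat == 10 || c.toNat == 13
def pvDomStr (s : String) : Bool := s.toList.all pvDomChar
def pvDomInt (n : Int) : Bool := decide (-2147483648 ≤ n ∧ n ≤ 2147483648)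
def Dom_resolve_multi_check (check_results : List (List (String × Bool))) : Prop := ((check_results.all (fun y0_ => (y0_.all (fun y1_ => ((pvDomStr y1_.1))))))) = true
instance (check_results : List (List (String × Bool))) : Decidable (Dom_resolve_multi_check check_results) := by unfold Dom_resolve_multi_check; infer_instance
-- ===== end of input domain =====

-- ===== PORT A =====
-- B reduces the list to the set of distinct success flags and dispatches via a 4-entry table (alternative).
-- r["success"]: first-match assoc-list lookup; KeyError (none) when the key is missing → excluded by Pre_.
def pvSucc (r : List (String × Bool)) : Bool :=
  ((PySem.Dict.mk r).get? "success").getD false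

def resolve_multi_check (check_results : List (List (String × Bool))) : String :=
  if check_results = [] then "full_failure"
  else
    let s : Int := check_results.foldl (fun acc r => if pvSucc r then acc + 1 else acc) 0
    if s = (check_results.length : Int) then "full_success"
    else if s = 0 then "full_failure"
    else "partial_success"

-- ===== PORT B =====
def resolve_multi_check_alt (check_results : List (List (String × Bool))) : String :=
  let seen : PySem.Set Bool := PySem.Set.ofList (check_results.map pvSucc)
  ((PySem.Dict.mk [((true, false), "full_success"),
                   ((false, true), "full_failure"),
                   ((true, true), "partial_success"),
                   ((false, false), "full_failure")]).get?
      (PySem.Set.contains seen true, PySem.Set.contains seen false)).getD ""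

-- ===== PRECONDITION & SPEC =====
-- Pre_: every element dict has the key "success" (otherwise Python A raises KeyError).
def Pre_resolve_multi_check (check_results : List (List (String × Bool))) : Prop :=
  (check_results.all (fun r => (PySem.Dict.mk r).contains "success")) = true
instance (check_results : List (List (String × Bool))) : Decidable (Pre_resolve_multi_check check_results) := by unfold Pre_resolve_multi_check; infer_instance

def pvWitness_resolve_multi_check : (List (List (String × Bool))) := [[("success", true)], [("success", false)]]

def Spec_resolve_multi_check (check_results : List (List (String × Bool))) (out : String) : Prop := out = resolve_multi_check_alt check_results
instance (check_results : List (List (String × Bool))) (out : String) : Decidable (Spec_resolve_multi_check check_results out) := by unfold Spec_resolve_multi_check; infer_instance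

-- ===== CLAIM (what is proved, stated in full; the proofs are below) =====
def Claim_equal_resolve_multi_check : Prop := ∀ (check_results : List (List (String × Bool))), Dom_resolve_multi_check check_results → Pre_resolve_multi_check check_results → Spec_resolve_multi_check check_results (resolve_multi_check check_results)

-- ===== LEMMAS AND PROOFS =====
theorem pvCount_eq_countP (l : List (List (String × Bool))) (n : Int) :
    l.foldl (fun acc r => if pvSucc r then acc + 1 else acc) n = n + (l.countP pvSucc : Int) := by
  induction l generalizing n with
  | nil => simp
  | cons r t ih =>
    simp only [List.foldl_cons, List.countP_cons, ih]
    by_cases h : pvSucc r = true <;> (simp [h]; try ring)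

theorem pvContains_ofList (xs : List Bool) (b : Bool) :
    PySem.Set.contains (PySem.Set.ofList xs) b = xs.contains b := by
  simp [PySem.Set.contains, PySem.Set.mem_ofList]

-- ===== VERDICT (by name: the statement is the Claim_ definition above) =====
theorem resolve_multi_check_spec : Claim_equal_resolve_multi_check := by
  intro l _ _
  unfold Spec_resolve_multi_check resolve_multi_check resolve_multi_check_alt
  simp only [pvContains_ofList]
  rcases eq_or_ne l [] with h | h
  · subst h; decide
  · simp only [if_neg h, pvCount_eq_countP, zero_add]
    have hT : (l.map pvSucc).contains true = l.any pvSucc := by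
      rw [Bool.eq_iff_iff]
      simp [List.contains_eq_mem, List.mem_map, List.any_eq_true]
    have hF : (l.map pvSucc).contains false = !l.all pvSucc := by
      rw [Bool.eq_iff_iff]
      simp [List.contains_eq_mem, List.mem_map]
    rw [hT, hF]
    by_cases hall : l.all pvSucc
    · have hclen : l.countP pvSucc = l.length := by
        rw [List.countP_eq_length]; intro a ha; exact (List.all_eq_true.mp hall) a ha
      have hany : l.any pvSucc = true := by
        rcases List.exists_mem_of_ne_nil l h with ⟨a, ha⟩
        exact List.any_eq_true.mpr ⟨a, ha, (List.all_eq_true.mp hall) a ha⟩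
      simp [hall, hany, hclen, PySem.Dict.get?]
    · have hne : (l.countP pvSucc : Int) ≠ (l.length : Int) := by
        have : l.countP pvSucc ≠ l.length := fun hc =>
          hall (List.all_eq_true.mpr (List.countP_eq_length.mp hc))
        exact_mod_cast this
      by_cases hany : l.any pvSucc
      · have h0 : (l.countP pvSucc : Int) ≠ 0 := by
          have : l.countP pvSucc ≠ 0 := by
            rw [Ne, List.countP_eq_zero]
            obtain ⟨a, ha, hpa⟩ := List.any_eq_true.mp hany
            exact fun hz => hz a ha hpa
          exact_mod_cast this
        simp only [hall, hany, if_neg hne, if_neg h0]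
        simp [PySem.Dict.get?]
      · have h0 : (l.countP pvSucc : Int) = 0 := by
          have : l.countP pvSucc = 0 := by
            rw [List.countP_eq_zero]
            exact fun a ha hpa => hany (List.any_eq_true.mpr ⟨a, ha, hpa⟩)
          exact_mod_cast this
        have hlen : (0 : Int) ≠ (l.length : Int) := by
          have := List.length_pos_of_ne_nil h; omega
        simp only [hall, hany, h0, if_neg hlen]
        simp [PySem.Dict.get?]
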